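-- pv_equiv track=rewrite | github.com/mona15/codepuzzle | seats.py | one_row_requested_seats
-- ===== SOURCE A (Python) =====
-- def left(x):
--     """return potentiel left element of the given element
--     """
--     i = list(x)
--     i[1] = str(int(x[1]) - 1)
--     i = "".join(i)
--     return i
--
-- def right(x):
--     """return potentiel right element of the given element
--     """
--     i = list(x)
--     i[1] = str(int(x[1]) + 1)
--     i = "".join(i)
--     return i
--
-- def verify_around(tab_best, elt, around_available):
--     """
--     can verify left element and right element of elt based on around_available
--
--     Parameters
--     ----------
--     tab_best : list
--         the table with all element
--     elt : string
--         the element that we want to check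
--     around_available : string
--         is a variable that tell if we can look left and right for the element
--         or only left for the element or only right for the element
--     """
--     if around_available == "OK":
--         if left(elt) in tab_best and right(elt) in tab_best:
--             return 'OK'
--         elif left(elt) in tab_best :
--             return 'left'
--         elif right(elt) in tab_best:
--             return 'right'
--     if around_available == "LEFT":
--         if left(elt) in tab_best :
--             return 'left'
--     if around_available == "RIGHT":
--         if right(elt) in tab_best:
--             return 'right'
--     else:
--         return 'KO'
--
-- def one_row_requested_seats(tab_best, num, original_tab_best, around_available):
--     """for a given row, based on requested seats,
--     give the maximum number of seats that are side by side
--     """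
--     if num == 1:
--         return []
--     potentiel = []
--     if original_tab_best :
--         s = verify_around(original_tab_best, tab_best[0], around_available)
--     else:
--         return []
--     if s == 'OK':
--         if num == 2:
--             potentiel.append(tab_best[0])
--             potentiel.append(left(tab_best[0]))
--             return potentiel
--             around_available = "OK"
--         else:
--             potentiel.append(tab_best[0])
--             potentiel.append(left(tab_best[0]))
--             potentiel.append(right(tab_best[0]))
--             around_available = "OK"
--
--     if s == 'left':
--         potentiel.append(tab_best[0])
--         potentiel.append(left(tab_best[0]))
--         around_available = "LEFT"
--     if s == 'right':
--         potentiel.append(tab_best[0])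
--         potentiel.append(right(tab_best[0]))
--         around_available = "RIGHT"
--     if s == 'KO':
--         potentiel.append(tab_best[0])
--         return potentiel
--     return potentiel + one_row_requested_seats(tab_best[1:], num-1, original_tab_best, around_available)
-- ===== SOURCE B (Python) =====
-- def left(x):
--     """return potentiel left element of the given element
--     """
--     i = list(x)
--     i[1] = str(int(x[1]) - 1)
--     i = "".join(i)
--     return i
--
-- def right(x):
--     """return potentiel right element of the given element
--     """
--     i = list(x)
--     i[1] = str(int(x[1]) + 1)
--     i = "".join(i)
--     return i
--
-- def verify_around(tab_best, elt, around_available):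
--     """same helper as the original module, kept verbatim"""
--     if around_available == "OK":
--         if left(elt) in tab_best and right(elt) in tab_best:
--             return 'OK'
--         elif left(elt) in tab_best:
--             return 'left'
--         elif right(elt) in tab_best:
--             return 'right'
--     if around_available == "LEFT":
--         if left(elt) in tab_best:
--             return 'left'
--     if around_available == "RIGHT":
--         if right(elt) in tab_best:
--             return 'right'
--     else:
--         return 'KO'
--
-- def one_row_requested_seats(tab_best, num, original_tab_best, around_available):
--     """iterative version: an explicit index loop with an accumulator
--     instead of recursion on tab_best slices"""
--     if not original_tab_best:
--         return []
--     result = []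
--     i = 0
--     n = num
--     while n != 1:
--         elt = tab_best[i]
--         s = verify_around(original_tab_best, elt, around_available)
--         if s == 'OK':
--             if n == 2:
--                 return result + [elt, left(elt)]
--             result = result + [elt, left(elt), right(elt)]
--             around_available = "OK"
--         elif s == 'left':
--             result = result + [elt, left(elt)]
--             around_available = "LEFT"
--         elif s == 'right':
--             result = result + [elt, right(elt)]
--             around_available = "RIGHT"
--         elif s == 'KO':
--             return result + [elt]
--         i += 1
--         n -= 1
--     return result
-- ===== Notes on version B (the rewrite author's own statement) =====
-- stated objective: alternative
-- what changed: Replaced A's recursion on tab_best[1:] slices (rebuilding the result with list concatenations up the call stack) with a single explicit while-loop over an index i carrying an accumulator, a remaining-seats counter and the mutable around_available; the helpers left/right/verify_around are kept verbatim.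
-- outside the precondition, e.g. on one_row_requested_seats(['A1', 'ZZ'], 3, ['A1', 'A9'], 'OK'): A returns ['A1'], B returns ['A1']; on one_row_requested_seats(['B5'], 5, ['A1'], 'OK'): A returns ['B5'], B returns ['B5']
import Mathlib
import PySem

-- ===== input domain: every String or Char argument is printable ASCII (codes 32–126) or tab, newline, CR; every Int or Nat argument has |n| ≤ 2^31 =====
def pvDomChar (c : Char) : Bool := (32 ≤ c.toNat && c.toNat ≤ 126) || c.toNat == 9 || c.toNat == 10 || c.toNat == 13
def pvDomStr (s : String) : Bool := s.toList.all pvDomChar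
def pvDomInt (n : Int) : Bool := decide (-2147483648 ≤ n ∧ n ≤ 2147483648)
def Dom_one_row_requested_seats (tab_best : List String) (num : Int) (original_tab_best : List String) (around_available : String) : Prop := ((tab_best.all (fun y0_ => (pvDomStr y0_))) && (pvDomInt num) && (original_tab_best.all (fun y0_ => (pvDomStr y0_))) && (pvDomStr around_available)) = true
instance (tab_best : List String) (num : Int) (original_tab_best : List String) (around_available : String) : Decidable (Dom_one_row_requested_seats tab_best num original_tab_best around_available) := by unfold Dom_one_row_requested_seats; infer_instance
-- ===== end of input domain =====

-- B replaces A's recursion-on-slices with one explicit index loop and an accumulator (objective: alternative decomposition, same cost).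

-- ===== PORT A =====
-- shared module helpers (left / right / verify_around), used verbatim by both Pythons

-- left(x): replace x[1] by str(int(x[1]) - 1).  Where Python raises
-- (len < 2 → IndexError, non-int char → ValueError) this returns x; excluded by Pre_.
def pvLeft (x : String) : String :=
  match x.toList with
  | c0 :: c1 :: rest =>
    match PySem.Int.ofStr? (String.mk [c1]) with
    | some d => String.mk (c0 :: ((PySem.Int.toStr (d - 1)).toList ++ rest))
    | none => x
  | _ => x

-- right(x): replace x[1] by str(int(x[1]) + 1); same raise mapping as pvLeft.
def pvRight (x : String) : String :=
  match x.toList with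
  | c0 :: c1 :: rest =>
    match PySem.Int.ofStr? (String.mk [c1]) with
    | some d => String.mk (c0 :: ((PySem.Int.toStr (d + 1)).toList ++ rest))
    | none => x
  | _ => x

-- verify_around: returns some "OK"/"left"/"right"/"KO", or none where the
-- Python function falls through and returns None (av == "RIGHT", right not in tab).
def pvVerifyAround (tab : List String) (elt : String) (av : String) : Option String :=
  let first : Option String :=
    if av = "OK" then
      if pvLeft elt ∈ tab ∧ pvRight elt ∈ tab then some "OK"
      else if pvLeft elt ∈ tab then some "left"
      else if pvRight elt ∈ tab then some "right"
      else none
    else none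
  match first with
  | some v => some v
  | none =>
    if av = "LEFT" ∧ pvLeft elt ∈ tab then some "left"
    else if av = "RIGHT" then (if pvRight elt ∈ tab then some "right" else none)
    else some "KO"

-- A: recursion on tab_best[1:].  The empty-list case with original nonempty is
-- Python's IndexError (excluded by Pre_); the port returns [] there.
def one_row_requested_seats (tab_best : List String) (num : Int) (original_tab_best : List String) (around_available : String) : List String :=
  if num = 1 then []
  else
    match tab_best with
    | [] => []
    | x :: rest =>
      if original_tab_best = [] then []
      else
        let s := pvVerifyAround original_tab_best x around_available
        if s = some "OK" then
          if num = 2 then [x, pvLeft x]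
          else [x, pvLeft x, pvRight x] ++ one_row_requested_seats rest (num - 1) original_tab_best "OK"
        else if s = some "left" then
          [x, pvLeft x] ++ one_row_requested_seats rest (num - 1) original_tab_best "LEFT"
        else if s = some "right" then
          [x, pvRight x] ++ one_row_requested_seats rest (num - 1) original_tab_best "RIGHT"
        else if s = some "KO" then [x]
        else one_row_requested_seats rest (num - 1) original_tab_best around_available

-- ===== PORT B =====
-- B's while-loop over an index i with an accumulator; the Nat fuel only bounds
-- the loop (it is large enough wherever the Python loop terminates or returns);
-- pyGet? none is Python's IndexError at tab_best[i] (excluded by Pre_).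
def pvAltLoop (tab original : List String) : Nat → Nat → Int → String → List String → List String
  | 0, _, _, _, result => result
  | fuel + 1, i, n, around, result =>
    if n = 1 then result
    else
      match PySem.List.pyGet? tab (i : Int) with
      | none => result
      | some elt =>
        let s := pvVerifyAround original elt around
        if s = some "OK" then
          if n = 2 then result ++ [elt, pvLeft elt]
          else pvAltLoop tab original fuel (i + 1) (n - 1) "OK" (result ++ [elt, pvLeft elt, pvRight elt])
        else if s = some "left" then pvAltLoop tab original fuel (i + 1) (n - 1) "LEFT" (result ++ [elt, pvLeft elt])
        else if s = some "right" then pvAltLoop tab original fuel (i + 1) (n - 1) "RIGHT" (result ++ [elt, pvRight elt])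
        else if s = some "KO" then result ++ [elt]
        else pvAltLoop tab original fuel (i + 1) (n - 1) around result

def one_row_requested_seats_alt (tab_best : List String) (num : Int) (original_tab_best : List String) (around_available : String) : List String :=
  if original_tab_best = [] then []
  else pvAltLoop tab_best original_tab_best ((num - 1).toNat + tab_best.length + 1) 0 num around_available []

-- ===== PRECONDITION & SPEC =====
-- a seat string is safe for left/right: length ≥ 2 and an int-parsable char at index 1
def pvWfSeat (s : String) : Bool :=
  match s.toList with
  | _ :: c :: _ => (PySem.Int.ofStr? (String.mk [c])).isSome
  | _ => false

-- Pre_ excludes the inputs on which the Python A can raise: IndexError (tab_best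
-- exhausted before num counts down to 1, or num ≤ 0 with original nonempty) and
-- ValueError/IndexError inside left/right (an element without an int-parsable char
-- at index 1); with around_available outside {OK, LEFT, RIGHT} the first step is an
-- unconditional early 'KO' return, so only a nonempty tab_best is needed.  The wf
-- branch is a static over-approximation: on a few excluded inputs A still returns
-- via an early 'KO' return before reaching the bad element, and B returns the same
-- value there (see cites).
def Pre_one_row_requested_seats (tab_best : List String) (num : Int) (original_tab_best : List String) (around_available : String) : Prop :=
  num = 1 ∨ original_tab_best = [] ∨
    (around_available ≠ "OK" ∧ around_available ≠ "LEFT" ∧ around_available ≠ "RIGHT" ∧ tab_best ≠ []) ∨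
    (1 ≤ num ∧ num - 1 ≤ (tab_best.length : Int) ∧ tab_best.all pvWfSeat = true)

instance (tab_best : List String) (num : Int) (original_tab_best : List String) (around_available : String) : Decidable (Pre_one_row_requested_seats tab_best num original_tab_best around_available) := by unfold Pre_one_row_requested_seats; infer_instance

def pvWitness_one_row_requested_seats : List String × Int × List String × String := (["A1", "A2"], 2, ["A1", "A2"], "OK")

def Spec_one_row_requested_seats (tab_best : List String) (num : Int) (original_tab_best : List String) (around_available : String) (out : List String) : Prop := out = one_row_requested_seats_alt tab_best num original_tab_best around_available
instance (tab_best : List String) (num : Int) (original_tab_best : List String) (around_available : String) (out : List String) : Decidable (Spec_one_row_requested_seats tab_best num original_tab_best around_available out) := by unfold Spec_one_row_requested_seats; infer_instance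

-- ===== CLAIM (what is proved, stated in full; the proofs are below) =====
def Claim_equal_one_row_requested_seats : Prop := ∀ (tab_best : List String) (num : Int) (original_tab_best : List String) (around_available : String), Dom_one_row_requested_seats tab_best num original_tab_best around_available → Pre_one_row_requested_seats tab_best num original_tab_best around_available → Spec_one_row_requested_seats tab_best num original_tab_best around_available (one_row_requested_seats tab_best num original_tab_best around_available)

-- ===== LEMMAS AND PROOFS =====

-- the loop of B, started at index i with enough fuel, appends exactly what A's
-- recursion computes on tab.drop i
lemma pvKey (fuel : Nat) : ∀ (tab original : List String) (around : String) (n : Int) (i : Nat) (acc : List String),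
    original ≠ [] → (n - 1).toNat + (tab.length - i) + 1 ≤ fuel →
    pvAltLoop tab original fuel i n around acc = acc ++ one_row_requested_seats (tab.drop i) n original around := by
  induction fuel with
  | zero => intro tab original around n i acc _ hf; omega
  | succ fuel ih =>
    intro tab original around n i acc ho hf
    by_cases hn1 : n = 1
    · subst hn1
      cases tab.drop i <;> simp [pvAltLoop, one_row_requested_seats]
    · rcases hx : tab[i]? with _ | x
      · have hlen : tab.length ≤ i := List.getElem?_eq_none_iff.mp hx
        have hdrop : tab.drop i = [] := List.drop_eq_nil_of_le hlen
        simp [pvAltLoop, hn1, hx, hdrop, one_row_requested_seats]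
      · have hi : i < tab.length := by
          rcases Nat.lt_or_ge i tab.length with h | h
          · exact h
          · rw [List.getElem?_eq_none_iff.mpr h] at hx; cases hx
        have hdrop : tab.drop i = x :: tab.drop (i + 1) := by
          rw [List.drop_eq_getElem_cons hi]
          simp [List.getElem?_eq_getElem hi] at hx
          simp [hx]
        have hf' : (n - 1 - 1).toNat + (tab.length - (i + 1)) + 1 ≤ fuel := by omega
        rw [hdrop]
        simp only [pvAltLoop, if_neg hn1, PySem.List.pyGet?_natCast, hx]
        simp only [one_row_requested_seats, if_neg hn1, if_neg ho]
        set s := pvVerifyAround original x around with hs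
        by_cases h1 : s = some "OK"
        · by_cases h2 : n = 2
        -- n = 2 branch returns immediately in both
          · simp [h1, h2]
          · simp only [h1, if_pos rfl, if_neg h2, if_pos]
            rw [ih tab original "OK" (n - 1) (i + 1) _ ho hf']
            simp
        · by_cases h3 : s = some "left"
          · simp only [if_neg h1, h3, if_pos rfl]
            rw [ih tab original "LEFT" (n - 1) (i + 1) _ ho hf']
            simp
          · by_cases h4 : s = some "right"
            · simp only [if_neg h1, if_neg h3, h4, if_pos rfl]
              rw [ih tab original "RIGHT" (n - 1) (i + 1) _ ho hf']
              simp
            · by_cases h5 : s = some "KO"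
              · simp [h1, h3, h4, h5]
              · simp only [if_neg h1, if_neg h3, if_neg h4, if_neg h5]
                exact ih tab original around (n - 1) (i + 1) _ ho hf'

lemma pvOrigEmpty (tab : List String) (n : Int) (av : String) :
    one_row_requested_seats tab n [] av = [] := by
  cases tab <;> simp [one_row_requested_seats]

-- ===== VERDICT (by name: the statement is the Claim_ definition above) =====
theorem one_row_requested_seats_spec : Claim_equal_one_row_requested_seats := by
  unfold Claim_equal_one_row_requested_seats
  intro tab num orig av _hd _hp
  unfold Spec_one_row_requested_seats one_row_requested_seats_alt
  by_cases ho : orig = []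
  · subst ho
    simp [pvOrigEmpty]
  · rw [if_neg ho, pvKey ((num - 1).toNat + tab.length + 1) tab orig av num 0 [] ho (by omega)]
    simp
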